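-- pv_equiv track=rewrite | github.com/Hussain-D/Freestyle | Py-Interview_Coding-Prep/9.LargeSmallSum.py | LargeSmallSum
-- ===== SOURCE A (Python) =====
-- def LargeSmallSum(l):
--     if len(l)==0 or len(l)<=3:
--         return 0
--     else:
--
--         #finding second smallest at odd position
--         odd_index = [l[i] for i in range(len(l)) if i%2!=0]
--         odd_index.sort()
--         sec_smal_odd = odd_index[0] if len(odd_index)<3 else odd_index[1]
--         #finding second largest at even position
--         even_index = [l[i] for i in range(len(l)) if i%2==0]
--         even_index.sort()
--         sec_lar_eve = even_index[0] if len(even_index)<3 else even_index[-2]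
--
--         return sec_smal_odd+sec_lar_eve
-- ===== SOURCE B (Python) =====
-- def LargeSmallSum(l):
--     if len(l) <= 3:
--         return 0
--     s1 = s2 = None  # two smallest values at odd indices (s1 <= s2)
--     g1 = g2 = None  # two largest values at even indices (g1 >= g2)
--     for i, x in enumerate(l):
--         if i % 2:
--             if s1 is None or x < s1:
--                 s1, s2 = x, s1
--             elif s2 is None or x < s2:
--                 s2 = x
--         else:
--             if g1 is None or x > g1:
--                 g1, g2 = x, g1
--             elif g2 is None or x > g2:
--                 g2 = x
--     # with fewer than three odd-index values (len < 6) the smallest is used, as in A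
--     sec_smal_odd = s1 if len(l) < 6 else s2
--     return sec_smal_odd + g2
-- ===== Notes on version B (the rewrite author's own statement) =====
-- stated objective: faster
-- what changed: replaces A's two index-comprehension + sort passes with a single linear scan over enumerate(l) that tracks the two smallest odd-index values and the two largest even-index values
import Mathlib
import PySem

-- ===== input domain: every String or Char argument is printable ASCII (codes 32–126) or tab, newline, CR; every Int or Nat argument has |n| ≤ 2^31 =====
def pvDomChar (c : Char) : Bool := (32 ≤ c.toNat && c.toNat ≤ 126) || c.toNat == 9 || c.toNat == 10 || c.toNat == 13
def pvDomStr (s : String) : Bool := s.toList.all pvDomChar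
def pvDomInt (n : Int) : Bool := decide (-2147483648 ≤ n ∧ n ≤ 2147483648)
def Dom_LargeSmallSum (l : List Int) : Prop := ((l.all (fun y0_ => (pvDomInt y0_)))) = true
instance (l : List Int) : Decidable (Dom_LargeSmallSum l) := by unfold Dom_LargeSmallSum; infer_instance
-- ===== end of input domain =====

-- B replaces A's two comprehension+sort passes by one linear scan keeping the two smallest
-- odd-index and the two largest even-index values (objective: faster, measured).

-- ===== PORT A =====
-- every index handed to pyGetD below is produced by range(len(l)) or is 0/1/-2 on a list of
-- length ≥ 2, so it is always in range and pyGetD agrees with Python's raising l[i]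
def LargeSmallSum (l : List Int) : Int :=
  if l.length = 0 ∨ l.length ≤ 3 then 0
  else
    let odd_index := ((PySem.List.pyRange 0 (l.length : Int) 1).filter
        (fun i => !(PySem.Int.mod i 2 == 0))).map (fun i => PySem.List.pyGetD l i 0)
    -- Python sorts odd_index in place; the sorted list is named explicitly here
    let odd_sorted := PySem.List.sorted odd_index (fun x => x) false
    let sec_smal_odd := if odd_index.length < 3 then PySem.List.pyGetD odd_sorted 0 0
                        else PySem.List.pyGetD odd_sorted 1 0
    let even_index := ((PySem.List.pyRange 0 (l.length : Int) 1).filter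
        (fun i => PySem.Int.mod i 2 == 0)).map (fun i => PySem.List.pyGetD l i 0)
    let even_sorted := PySem.List.sorted even_index (fun x => x) false
    let sec_lar_eve := if even_index.length < 3 then PySem.List.pyGetD even_sorted 0 0
                       else PySem.List.pyGetD even_sorted (-2) 0
    sec_smal_odd + sec_lar_eve

-- ===== PORT B =====
-- 'if s1 is None or x < s1: s1, s2 = x, s1  elif s2 is None or x < s2: s2 = x'
def pvMinStep (st : Option Int × Option Int) (x : Int) : Option Int × Option Int :=
  match st with
  | (none, _s2) => (some x, none)  -- s1 None: s1, s2 = x, s1 (s1 was None)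
  | (some a, s2) =>
    if x < a then (some x, some a)
    else match s2 with
      | none => (some a, some x)
      | some b => if x < b then (some a, some x) else (some a, some b)

-- 'if g1 is None or x > g1: g1, g2 = x, g1  elif g2 is None or x > g2: g2 = x'
def pvMaxStep (st : Option Int × Option Int) (x : Int) : Option Int × Option Int :=
  match st with
  | (none, _g2) => (some x, none)
  | (some a, g2) =>
    if x > a then (some x, some a)
    else match g2 with
      | none => (some a, some x)
      | some b => if x > b then (some a, some x) else (some a, some b)

-- one iteration of B's loop body: p = (i, x)
def pvStep (st : (Option Int × Option Int) × (Option Int × Option Int)) (p : Int × Int) :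
    (Option Int × Option Int) × (Option Int × Option Int) :=
  if PySem.Int.mod p.1 2 ≠ 0 then (pvMinStep st.1 p.2, st.2) else (st.1, pvMaxStep st.2 p.2)

def LargeSmallSum_alt (l : List Int) : Int :=
  if l.length ≤ 3 then 0
  else
    let st := (PySem.List.enumerate l 0).foldl pvStep ((none, none), (none, none))
    -- with fewer than three odd-index values (len < 6) the smallest is used, as in A
    let sec_smal_odd := if l.length < 6 then st.1.1 else st.1.2
    -- for length ≥ 4 all values read here are populated; Python never sees None here
    match sec_smal_odd, st.2.2 with
    | some s2, some g2 => s2 + g2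
    | _, _ => 0

-- ===== PRECONDITION & SPEC =====
def Spec_LargeSmallSum (l : List Int) (out : Int) : Prop := out = LargeSmallSum_alt l
instance (l : List Int) (out : Int) : Decidable (Spec_LargeSmallSum l out) := by
  unfold Spec_LargeSmallSum; infer_instance

-- ===== CLAIM (what is proved, stated in full; the proofs are below) =====
def Claim_equal_LargeSmallSum : Prop :=
  ∀ (l : List Int), Dom_LargeSmallSum l → Spec_LargeSmallSum l (LargeSmallSum l)

-- ===== LEMMAS AND PROOFS =====

-- (evens, odds) of a list by positions, two at a time
def pvSplit : List Int → List Int × List Int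
  | [] => ([], [])
  | a :: t => (a :: (pvSplit t).2, (pvSplit t).1)

-- left-fold insertion sort
def pvIns (x : Int) (s : List Int) : List Int := List.orderedInsert (· ≤ ·) x s
def pvIsort (s : List Int) (ys : List Int) : List Int := ys.foldl (fun acc x => pvIns x acc) s

-- first two elements
def pvF2 (t : List Int) : Option Int × Option Int := (t[0]?, t[1]?)

lemma pvIsort_perm : ∀ (ys s : List Int), (pvIsort s ys).Perm (s ++ ys) := by
  intro ys
  induction ys with
  | nil => intro s; simp [pvIsort]
  | cons y ys ih =>
    intro s
    have h1 : pvIsort s (y :: ys) = pvIsort (pvIns y s) ys := by simp [pvIsort]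
    rw [h1]
    refine (ih (pvIns y s)).trans ?_
    have h2 : (pvIns y s ++ ys).Perm ((y :: s) ++ ys) :=
      (List.perm_orderedInsert _ y s).append_right ys
    exact h2.trans List.perm_middle.symm

lemma pvIsort_pairwise : ∀ (ys s : List Int), s.Pairwise (· ≤ ·) →
    (pvIsort s ys).Pairwise (· ≤ ·) := by
  intro ys
  induction ys with
  | nil => intro s hs; simpa [pvIsort] using hs
  | cons y ys ih =>
    intro s hs
    have h1 : pvIsort s (y :: ys) = pvIsort (pvIns y s) ys := by simp [pvIsort]
    rw [h1]
    exact ih _ (List.Pairwise.orderedInsert y s hs)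

lemma pvSorted_eq_isort (xs : List Int) :
    PySem.List.sorted xs (fun x => x) = pvIsort [] xs := by
  refine PySem.List.sorted_id_eq_of_perm_of_pairwise xs _ ?_ ?_
  · simpa using pvIsort_perm xs []
  · exact pvIsort_pairwise xs [] (by simp)

lemma pvF2_ins (x : Int) (s : List Int) (hs : s.Pairwise (· ≤ ·)) :
    pvF2 (pvIns x s) = pvMinStep (pvF2 s) x := by
  match s, hs with
  | [], _ => simp [pvF2, pvIns, List.orderedInsert, pvMinStep]
  | [a], _ =>
    simp only [pvF2, pvIns, List.orderedInsert, pvMinStep]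
    split_ifs <;> simp_all <;> omega
  | a :: b :: t, hs =>
    have hab : a ≤ b := (List.pairwise_cons.1 hs).1 b (by simp)
    simp only [pvF2, pvIns, List.orderedInsert, pvMinStep]
    split_ifs <;> simp_all <;> (intros; split_ifs <;> simp_all <;> omega)

lemma pvMinFold (ys : List Int) : ∀ (s : List Int), s.Pairwise (· ≤ ·) →
    ys.foldl pvMinStep (pvF2 s) = pvF2 (pvIsort s ys) := by
  induction ys with
  | nil => intro s hs; simp [pvIsort]
  | cons y ys ih =>
    intro s hs
    have h1 : pvIsort s (y :: ys) = pvIsort (pvIns y s) ys := by simp [pvIsort]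
    rw [h1, List.foldl_cons, ← pvF2_ins y s hs]
    exact ih _ (List.Pairwise.orderedInsert y s hs)

lemma pvMaxStep_neg (st : Option Int × Option Int) (x : Int) :
    pvMaxStep st x =
      ((pvMinStep (st.1.map Neg.neg, st.2.map Neg.neg) (-x)).1.map Neg.neg,
       (pvMinStep (st.1.map Neg.neg, st.2.map Neg.neg) (-x)).2.map Neg.neg) := by
  obtain ⟨s1, s2⟩ := st
  cases s1 <;> cases s2 <;>
    simp only [pvMaxStep, pvMinStep, Option.map_some, Option.map_none] <;>
    (try split_ifs) <;> simp_all <;> omega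

lemma pvMaxFold_gen (ys : List Int) : ∀ (st : Option Int × Option Int),
    ys.foldl pvMaxStep st =
      (((ys.map Neg.neg).foldl pvMinStep (st.1.map Neg.neg, st.2.map Neg.neg)).1.map Neg.neg,
       ((ys.map Neg.neg).foldl pvMinStep (st.1.map Neg.neg, st.2.map Neg.neg)).2.map Neg.neg) := by
  induction ys with
  | nil =>
    intro st
    obtain ⟨s1, s2⟩ := st
    cases s1 <;> cases s2 <;> simp
  | cons y ys ih =>
    intro st
    rw [List.map_cons, List.foldl_cons, List.foldl_cons, ih (pvMaxStep st y), pvMaxStep_neg]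
    simp [Option.map_map]

lemma pvMaxFold (ys : List Int) :
    ys.foldl pvMaxStep (none, none) =
      ((pvF2 (pvIsort [] (ys.map Neg.neg))).1.map Neg.neg,
       (pvF2 (pvIsort [] (ys.map Neg.neg))).2.map Neg.neg) := by
  have h := pvMaxFold_gen ys (none, none)
  have h0 : ((none, none) : Option Int × Option Int) = pvF2 [] := rfl
  simp only [Option.map_none] at h
  rw [h, h0, pvMinFold (ys.map Neg.neg) [] (by simp)]

lemma pvIsort_neg (e : List Int) :
    pvIsort [] (e.map Neg.neg) = ((pvIsort [] e).map Neg.neg).reverse := by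
  have h1 : PySem.List.sorted (e.map Neg.neg) (fun x => x) = pvIsort [] (e.map Neg.neg) :=
    pvSorted_eq_isort _
  have h2 : PySem.List.sorted (e.map Neg.neg) (fun x => x) =
      ((pvIsort [] e).map Neg.neg).reverse := by
    refine PySem.List.sorted_id_eq_of_perm_of_pairwise _ _ ?_ ?_
    · exact (List.reverse_perm _).trans ((pvIsort_perm e []).map Neg.neg)
    · rw [List.pairwise_reverse, List.pairwise_map]
      have := pvIsort_pairwise e [] (by simp)
      exact this.imp (by intro a b h; omega)
  rw [← h1, h2]

lemma pvBigFold : ∀ (l : List Int) (s : Int) (m g : Option Int × Option Int), 0 ≤ s →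
    ((s % 2 = 0 → (PySem.List.enumerate l s).foldl pvStep (m, g) =
        ((pvSplit l).2.foldl pvMinStep m, (pvSplit l).1.foldl pvMaxStep g)) ∧
     (s % 2 = 1 → (PySem.List.enumerate l s).foldl pvStep (m, g) =
        ((pvSplit l).1.foldl pvMinStep m, (pvSplit l).2.foldl pvMaxStep g))) := by
  intro l
  induction l with
  | nil => intro s m g hs; simp [PySem.List.enumerate, pvSplit]
  | cons a t ih =>
    intro s m g hs
    have hmod : PySem.Int.mod s 2 = s % 2 := PySem.Int.mod_eq_emod_of_pos (by omega)
    rw [PySem.List.enumerate_cons]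
    constructor
    · intro h0
      have hstep : pvStep (m, g) (s, a) = (m, pvMaxStep g a) := by
        simp [pvStep, h0]
      rw [List.foldl_cons, hstep]
      have := (ih (s + 1) m (pvMaxStep g a) (by omega)).2 (by omega)
      rw [this]
      simp [pvSplit]
    · intro h1
      have hstep : pvStep (m, g) (s, a) = (pvMinStep m a, g) := by
        simp [pvStep, h1]
      rw [List.foldl_cons, hstep]
      have := (ih (s + 1) (pvMinStep m a) g (by omega)).1 (by omega)
      rw [this]
      simp [pvSplit]

lemma pvSplit_range : ∀ (l : List Int),
    ((List.range l.length).filter (fun k => decide ¬ k % 2 = 0)).map (fun k => l.getD k 0) =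
      (pvSplit l).2 ∧
    ((List.range l.length).filter (fun k => decide (k % 2 = 0))).map (fun k => l.getD k 0) =
      (pvSplit l).1 := by
  intro l
  induction l with
  | nil => simp [pvSplit]
  | cons a t ih =>
    have hlen : (a :: t).length = t.length + 1 := rfl
    rw [hlen, List.range_succ_eq_map]
    have hodd : ∀ r : List Nat,
        (List.filter (fun k => decide ¬ k % 2 = 0) (r.map Nat.succ)) =
          (r.filter (fun k => decide (k % 2 = 0))).map Nat.succ := by
      intro r
      rw [List.filter_map]
      congr 1
      apply List.filter_congr
      intro k _
      simp only [Function.comp_apply]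
      rcases Nat.mod_two_eq_zero_or_one k with h | h <;> simp [Nat.succ_mod_two_eq_zero_iff, h]
    have heven : ∀ r : List Nat,
        (List.filter (fun k => decide (k % 2 = 0)) (r.map Nat.succ)) =
          (r.filter (fun k => decide ¬ k % 2 = 0)).map Nat.succ := by
      intro r
      rw [List.filter_map]
      congr 1
      apply List.filter_congr
      intro k _
      simp only [Function.comp_apply]
      rcases Nat.mod_two_eq_zero_or_one k with h | h <;> simp [Nat.succ_mod_two_eq_zero_iff, h]
    constructor
    · rw [List.filter_cons]
      simp only [Nat.zero_mod, decide_eq_true_eq]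
      rw [if_neg (by simp)]
      rw [hodd, List.map_map]
      have : ((a :: t).getD · 0) ∘ Nat.succ = (t.getD · 0) := by
        funext k; simp
      rw [this, ih.2]
      simp [pvSplit]
    · rw [List.filter_cons]
      rw [if_pos (by simp)]
      rw [heven, List.map_cons, List.map_map]
      have : ((a :: t).getD · 0) ∘ Nat.succ = (t.getD · 0) := by
        funext k; simp
      rw [this, ih.1]
      simp [pvSplit]

lemma pvComp_split (l : List Int) :
    ((PySem.List.pyRange 0 (l.length : Int) 1).filter
        (fun i => !(PySem.Int.mod i 2 == 0))).map (fun i => PySem.List.pyGetD l i 0) = (pvSplit l).2 ∧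
    ((PySem.List.pyRange 0 (l.length : Int) 1).filter
        (fun i => PySem.Int.mod i 2 == 0)).map (fun i => PySem.List.pyGetD l i 0) = (pvSplit l).1 := by
  have hmod : ∀ k : Nat, (PySem.Int.mod (k : Int) 2 == 0) = (decide (k % 2 = 0)) := by
    intro k
    have h : PySem.Int.mod (k : Int) 2 = ((k % 2 : Nat) : Int) := by
      exact_mod_cast PySem.Int.mod_natCast k 2
    rw [h]
    rcases Nat.mod_two_eq_zero_or_one k with hk | hk <;> simp [hk]
  have key : ∀ (p : Int → Bool) (q : Nat → Bool), (∀ k : Nat, p (k : Int) = q k) →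
      ((PySem.List.pyRange 0 (l.length : Int) 1).filter p).map (fun i => PySem.List.pyGetD l i 0)
        = ((List.range l.length).filter q).map (fun k => l.getD k 0) := by
    intro p q hpq
    rw [PySem.List.pyRange_one]
    simp only [Int.sub_zero, Int.toNat_natCast, zero_add]
    rw [List.filter_map, List.map_map]
    rw [List.filter_congr (fun k _ => by simpa using hpq k)]
    exact List.map_congr_left (fun k _ => by simp [PySem.List.pyGetD_natCast])
  constructor
  · rw [key _ (fun k => decide ¬ k % 2 = 0) (fun k => by rcases Nat.mod_two_eq_zero_or_one k with hk | hk <;> simp [hmod k, hk] <;> omega), (pvSplit_range l).1]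
  · rw [key _ (fun k => decide (k % 2 = 0)) (fun k => hmod k), (pvSplit_range l).2]

lemma pvSplit_length : ∀ (l : List Int),
    (pvSplit l).1.length = (l.length + 1) / 2 ∧ (pvSplit l).2.length = l.length / 2 := by
  intro l
  induction l with
  | nil => simp [pvSplit]
  | cons a t ih => simp [pvSplit, ih.1, ih.2]; omega

lemma pvGetD_neg2 (xs : List Int) (h : 2 ≤ xs.length) :
    PySem.List.pyGetD xs (-2) 0 = xs.getD (xs.length - 2) 0 := by
  simp only [PySem.List.pyGetD, PySem.List.pyGet?, PySem.List.pyIdx?]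
  rw [if_neg (by omega), if_pos (by omega)]
  simp [List.getD_eq_getElem?_getD]

lemma pvIsort_len (ys : List Int) : (pvIsort [] ys).length = ys.length := by
  simpa using (pvIsort_perm ys []).length_eq

lemma pvGetSome (ys : List Int) (k : Nat) (hk : k < ys.length) :
    ys[k]? = some (ys.getD k 0) := by
  rw [List.getElem?_eq_getElem hk, List.getD_eq_getElem?_getD, List.getElem?_eq_getElem hk]
  rfl

lemma pvA_char (l : List Int) (h : 4 ≤ l.length) :
    LargeSmallSum l =
      (if (pvSplit l).2.length < 3 then (pvIsort [] (pvSplit l).2).getD 0 0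
       else (pvIsort [] (pvSplit l).2).getD 1 0) +
      (pvIsort [] (pvSplit l).1).getD ((pvSplit l).1.length - 2) 0 := by
  have hlen := pvSplit_length l
  unfold LargeSmallSum
  rw [if_neg (by omega)]
  simp only [(pvComp_split l).1, (pvComp_split l).2, pvSorted_eq_isort,
    PySem.List.pyGetD_ofNat']
  congr 1
  by_cases he : (pvSplit l).1.length < 3
  · rw [if_pos he]
    have h2 : (pvSplit l).1.length - 2 = 0 := by omega
    rw [h2]
  · rw [if_neg he, pvGetD_neg2 _ (by rw [pvIsort_len]; omega), pvIsort_len]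

lemma pvB_char (l : List Int) (h : 4 ≤ l.length) :
    LargeSmallSum_alt l =
      (if (pvSplit l).2.length < 3 then (pvIsort [] (pvSplit l).2).getD 0 0
       else (pvIsort [] (pvSplit l).2).getD 1 0) +
      (pvIsort [] (pvSplit l).1).getD ((pvSplit l).1.length - 2) 0 := by
  have hlen := pvSplit_length l
  have h0 := (pvBigFold l 0 (none, none) (none, none) (by omega)).1 (by norm_num)
  unfold LargeSmallSum_alt
  rw [if_neg (by omega), h0]
  have hm : (pvSplit l).2.foldl pvMinStep (none, none) = pvF2 (pvIsort [] (pvSplit l).2) := by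
    have := pvMinFold (pvSplit l).2 [] (by simp)
    simpa [pvF2] using this
  have hg : (pvSplit l).1.foldl pvMaxStep (none, none) =
      ((pvF2 (pvIsort [] ((pvSplit l).1.map Neg.neg))).1.map Neg.neg,
       (pvF2 (pvIsort [] ((pvSplit l).1.map Neg.neg))).2.map Neg.neg) := pvMaxFold _
  have hodds : 1 < (pvIsort [] (pvSplit l).2).length := by rw [pvIsort_len]; omega
  have hm1 : (pvF2 (pvIsort [] (pvSplit l).2)).1 =
      some ((pvIsort [] (pvSplit l).2).getD 0 0) := by
    simp only [pvF2]
    exact pvGetSome _ 0 (by omega)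
  have hm2 : (pvF2 (pvIsort [] (pvSplit l).2)).2 =
      some ((pvIsort [] (pvSplit l).2).getD 1 0) := by
    simp only [pvF2]
    exact pvGetSome _ 1 hodds
  have hse : 1 < ((pvIsort [] (pvSplit l).1).map Neg.neg).length := by
    simp [pvIsort_len]; omega
  have hg2 : (pvF2 (pvIsort [] ((pvSplit l).1.map Neg.neg))).2 =
      some (-((pvIsort [] (pvSplit l).1).getD ((pvSplit l).1.length - 2) 0)) := by
    simp only [pvF2, pvIsort_neg]
    rw [List.getElem?_reverse hse]
    have hidx : ((pvIsort [] (pvSplit l).1).map Neg.neg).length - 1 - 1 =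
        (pvSplit l).1.length - 2 := by simp only [List.length_map, pvIsort_len]; omega
    rw [hidx, List.getElem?_map,
      pvGetSome _ ((pvSplit l).1.length - 2) (by rw [pvIsort_len]; omega)]
    rfl
  rw [hm, hg]
  by_cases h6 : l.length < 6
  · rw [if_pos (show (pvSplit l).2.length < 3 by omega)]
    simp [h6, hm1, hg2]
  · rw [if_neg (show ¬ (pvSplit l).2.length < 3 by omega)]
    simp [h6, hm2, hg2]

-- ===== VERDICT (by name: the statement is the Claim_ definition above) =====
theorem LargeSmallSum_spec : Claim_equal_LargeSmallSum := by
  unfold Claim_equal_LargeSmallSum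
  intro l _hd
  unfold Spec_LargeSmallSum
  by_cases h3 : l.length ≤ 3
  · unfold LargeSmallSum LargeSmallSum_alt
    rw [if_pos (by omega), if_pos h3]
  · have h4 : 4 ≤ l.length := by omega
    rw [pvA_char l h4, pvB_char l h4]
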